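-- pv_equiv track=rewrite | github.com/jedisct1/inferswitch | inferswitch/utils/chat_template.py | remove_oldest_message_pair
-- ===== SOURCE A (Python) =====
-- from typing import List, Dict
--
-- def remove_oldest_message_pair(
--     chat_messages: List[Dict[str, str]],
-- ) -> List[Dict[str, str]]:
--     """
--     Remove the oldest user/assistant message pair from the chat messages.
--
--     This function finds and removes the first user/assistant pair in the conversation,
--     preserving system messages and any standalone messages.
--
--     Args:
--         chat_messages: List of message dictionaries with 'role' and 'content'
--
--     Returns:
--         List of messages with the oldest user/assistant pair removed
--     """
--     if not chat_messages:
--         return chat_messages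
--
--     # Create a copy to avoid modifying the original
--     messages = chat_messages.copy()
--
--     # Find the first user message index (skipping system messages)
--     first_user_idx = -1
--     for i, msg in enumerate(messages):
--         if msg.get("role") == "user":
--             first_user_idx = i
--             break
--
--     # If no user message found, return as-is
--     if first_user_idx == -1:
--         return messages
--
--     # Check if there's an assistant message immediately after
--     if (
--         first_user_idx + 1 < len(messages)
--         and messages[first_user_idx + 1].get("role") == "assistant"
--     ):
--         # Remove both the user and assistant messages
--         del messages[first_user_idx : first_user_idx + 2]
--     else:
--         # Just remove the user message if no assistant follows
--         del messages[first_user_idx]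
--
--     return messages
-- ===== SOURCE B (Python) =====
-- def remove_oldest_message_pair(chat_messages):
--     if not chat_messages:
--         return chat_messages
--     result = []
--     removed = False
--     skip_if_assistant = False
--     for msg in list(chat_messages):
--         if skip_if_assistant:
--             skip_if_assistant = False
--             if msg.get("role") == "assistant":
--                 continue
--             result.append(msg)
--         elif not removed and msg.get("role") == "user":
--             removed = True
--             skip_if_assistant = True
--         else:
--             result.append(msg)
--     return result
-- ===== Notes on version B (the rewrite author's own statement) =====
-- stated objective: alternative
-- what changed: Replaces A's two-phase approach (index search for the first user message, then slice deletion) with a single-pass rebuild driven by removed/skip_if_assistant flags that decides per message whether to keep it.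
import Mathlib
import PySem

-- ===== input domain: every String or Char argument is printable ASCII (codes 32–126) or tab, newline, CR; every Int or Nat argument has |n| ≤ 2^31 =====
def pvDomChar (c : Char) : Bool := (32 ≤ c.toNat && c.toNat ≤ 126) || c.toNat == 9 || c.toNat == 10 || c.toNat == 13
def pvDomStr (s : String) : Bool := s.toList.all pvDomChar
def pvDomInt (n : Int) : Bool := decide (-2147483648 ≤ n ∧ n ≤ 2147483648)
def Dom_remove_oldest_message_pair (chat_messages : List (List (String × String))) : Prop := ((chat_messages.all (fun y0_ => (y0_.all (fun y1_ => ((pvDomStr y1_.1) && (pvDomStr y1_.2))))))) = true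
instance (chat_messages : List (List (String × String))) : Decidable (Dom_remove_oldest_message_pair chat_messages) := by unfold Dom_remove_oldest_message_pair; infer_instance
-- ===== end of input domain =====

-- B replaces A's index-search-then-slice-delete with a single-pass rebuild using removed/skip flags (alternative decomposition, same cost).

-- ===== PORT A =====
-- msg.get("role") on the association-list representation of the dict
def pvRole (m : List (String × String)) : Option String := (PySem.Dict.mk m).get? "role"

-- the 'for i, msg in enumerate(messages): if … break' search; the -1 sentinel is Option.none
def pvFindUser : List (List (String × String)) → Nat → Option Nat
  | [], _ => none
  | m :: rest, i => if pvRole m = some "user" then some i else pvFindUser rest (i + 1)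

def remove_oldest_message_pair (chat_messages : List (List (String × String))) : List (List (String × String)) :=
  if chat_messages = [] then chat_messages
  else
    match pvFindUser chat_messages 0 with
    | none => chat_messages
    | some i =>
      -- del messages[i:i+2] / del messages[i] rendered as take/drop (i is a valid non-negative index)
      if i + 1 < chat_messages.length ∧ (chat_messages[i+1]?).map pvRole = some (some "assistant")
      then chat_messages.take i ++ chat_messages.drop (i + 2)
      else chat_messages.take i ++ chat_messages.drop (i + 1)

-- ===== PORT B =====
-- the single for-loop of Source B over (messages, removed, skip_if_assistant)
def pvAltLoop : List (List (String × String)) → Bool → Bool → List (List (String × String))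
  | [], _, _ => []
  | m :: rest, removed, skipA =>
    if skipA then
      if pvRole m = some "assistant" then pvAltLoop rest removed false
      else m :: pvAltLoop rest removed false
    else if removed = false ∧ pvRole m = some "user" then pvAltLoop rest true true
    else m :: pvAltLoop rest removed false

def remove_oldest_message_pair_alt (chat_messages : List (List (String × String))) : List (List (String × String)) :=
  if chat_messages = [] then chat_messages
  else pvAltLoop chat_messages false false

-- ===== PRECONDITION & SPEC =====
def Spec_remove_oldest_message_pair (chat_messages : List (List (String × String))) (out : List (List (String × String))) : Prop := out = remove_oldest_message_pair_alt chat_messages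
instance (chat_messages : List (List (String × String))) (out : List (List (String × String))) : Decidable (Spec_remove_oldest_message_pair chat_messages out) := by unfold Spec_remove_oldest_message_pair; infer_instance

-- ===== CLAIM (what is proved, stated in full; the proofs are below) =====
def Claim_equal_remove_oldest_message_pair : Prop := ∀ (chat_messages : List (List (String × String))), Dom_remove_oldest_message_pair chat_messages → Spec_remove_oldest_message_pair chat_messages (remove_oldest_message_pair chat_messages)

-- ===== LEMMAS AND PROOFS =====

-- once removed and no skip pending, the loop copies the rest unchanged
theorem pvAltLoop_done (cm : List (List (String × String))) : pvAltLoop cm true false = cm := by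
  induction cm with
  | nil => rfl
  | cons m rest ih => simp [pvAltLoop, ih]

-- right after the user message was skipped: drop the head iff it is an assistant message
theorem pvAltLoop_skip (cm : List (List (String × String))) :
    pvAltLoop cm true true =
      (match cm with
       | [] => []
       | m :: rest => if pvRole m = some "assistant" then rest else m :: rest) := by
  cases cm with
  | nil => rfl
  | cons m rest => by_cases h : pvRole m = some "assistant" <;> simp [pvAltLoop, h, pvAltLoop_done]

-- shifting the start index of the enumerate search shifts the found index
theorem pvFindUser_shift (cm : List (List (String × String))) :
    ∀ k, pvFindUser cm (k + 1) = (pvFindUser cm k).map (· + 1) := by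
  induction cm with
  | nil => intro k; rfl
  | cons m rest ih =>
    intro k
    by_cases h : pvRole m = some "user" <;> simp [pvFindUser, h, ih (k + 1)]

-- the core equivalence on nonempty (and empty) input
theorem pvMain (cm : List (List (String × String))) :
    pvAltLoop cm false false =
      (match pvFindUser cm 0 with
       | none => cm
       | some i =>
         if i + 1 < cm.length ∧ (cm[i+1]?).map pvRole = some (some "assistant")
         then cm.take i ++ cm.drop (i + 2)
         else cm.take i ++ cm.drop (i + 1)) := by
  induction cm with
  | nil => rfl
  | cons m rest ih =>
    by_cases hu : pvRole m = some "user"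
    · simp only [pvAltLoop, pvFindUser, hu, if_true]
      rw [pvAltLoop_skip]
      cases rest with
      | nil => simp
      | cons m2 r2 =>
        by_cases ha : pvRole m2 = some "assistant" <;>
          simp [ha]
    · have hshift := pvFindUser_shift rest 0
      simp only [pvAltLoop, pvFindUser, hu, if_false, Bool.false_eq_true,
        Nat.zero_add] at *
      rw [hshift]
      cases hf : pvFindUser rest 0 with
      | none => simp [hf] at ih; simp [ih]
      | some i =>
        rw [ih]
        simp only [hf, Option.map_some]
        simp [List.take_succ_cons, List.drop_succ_cons]
        split <;> rfl

-- ===== VERDICT (by name: the statement is the Claim_ definition above) =====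
theorem remove_oldest_message_pair_spec : Claim_equal_remove_oldest_message_pair := by
  intro cm _
  show remove_oldest_message_pair cm = remove_oldest_message_pair_alt cm
  unfold remove_oldest_message_pair remove_oldest_message_pair_alt
  split_ifs with h
  · rfl
  · exact (pvMain cm).symm
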